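-- pv_equiv track=rewrite | github.com/UTokyoChenYe/SlopeSearch | old/try.py | spaced_word_matches
-- ===== SOURCE A (Python) =====
-- from typing import List
-- from collections import Counter
--
-- def spaced_word_matches(seq1: str, seq2: str, pattern: str) -> int:
--     """calculate the number of spaced-word matches between two sequences"""
--     def extract_spaced_word(sequence: str, pattern: str) -> List[str]:
--         words = []
--         pattern_length = len(pattern)
--         for i in range(len(sequence) - pattern_length + 1):
--             spaced_word = ''.join(sequence[i+j] for j in range(pattern_length) if pattern[j] == '1')
--             words.append(spaced_word)
--         return words
--
--     words1 = extract_spaced_word(seq1, pattern)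
--     words2 = extract_spaced_word(seq2, pattern)
--
--     word_count1 = Counter(words1)
--     word_count2 = Counter(words2)
--     matches = 0
--     for word in word_count1:
--         if word in word_count2:
--             matches += word_count1[word] * word_count2[word]
--     return matches
-- ===== SOURCE B (Python) =====
-- def spaced_word_matches(seq1: str, seq2: str, pattern: str) -> int:
--     """Brute-force: compare every window pair of seq1/seq2 directly,
--     character by character at the pattern's '1' positions — no Counter,
--     no spaced-word strings are ever built."""
--     pos = [j for j, c in enumerate(pattern) if c == '1']
--     m = len(pattern)
--     matches = 0
--     for i in range(len(seq2) - m + 1):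
--         for j in range(len(seq1) - m + 1):
--             if all(seq1[j + p] == seq2[i + p] for p in pos):
--                 matches += 1
--     return matches
-- ===== Notes on version B (the rewrite author's own statement) =====
-- stated objective: alternative
-- what changed: B replaces the Counter-based count-and-intersect with a direct brute-force comparison: it never builds spaced-word strings or any hash table, instead comparing every window pair of seq1 and seq2 character-by-character at the pattern's '1' positions and counting the matching pairs.
import Mathlib
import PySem

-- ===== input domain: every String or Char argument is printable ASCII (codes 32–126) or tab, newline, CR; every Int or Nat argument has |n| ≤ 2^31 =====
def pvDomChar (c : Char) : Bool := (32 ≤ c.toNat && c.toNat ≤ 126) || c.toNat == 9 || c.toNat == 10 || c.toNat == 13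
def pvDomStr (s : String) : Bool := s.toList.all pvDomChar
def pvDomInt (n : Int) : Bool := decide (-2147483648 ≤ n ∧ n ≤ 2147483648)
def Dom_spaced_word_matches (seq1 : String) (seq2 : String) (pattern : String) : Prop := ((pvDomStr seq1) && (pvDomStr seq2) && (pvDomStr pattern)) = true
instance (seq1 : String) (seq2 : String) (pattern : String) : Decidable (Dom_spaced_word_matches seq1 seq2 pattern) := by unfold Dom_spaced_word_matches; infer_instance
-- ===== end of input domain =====

-- B drops the Counters and the spaced-word strings entirely: it brute-force compares
-- every window pair of seq1/seq2 character-by-character at the pattern's '1' positions.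

-- ===== PORT A =====
-- extract_spaced_word: append each ''.join(sequence[i+j] for j in range(m) if pattern[j]=='1')
def pvExtractA (sequence : String) (pattern : String) : List String :=
  let s := sequence.toList
  let p := pattern.toList
  let m : Int := p.length
  (PySem.List.pyRange 0 ((s.length : Int) - m + 1) 1).foldl
    (fun words i =>
      words ++ [String.ofList ((PySem.List.pyRange 0 m 1).foldl
        (fun acc j => if PySem.List.pyGetD p j ' ' == '1'
                      then acc ++ [PySem.List.pyGetD s (i + j) ' '] else acc) [])])
    []

def spaced_word_matches (seq1 : String) (seq2 : String) (pattern : String) : Int :=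
  let words1 := pvExtractA seq1 pattern
  let words2 := pvExtractA seq2 pattern
  let c1 := PySem.Dict.counter words1
  let c2 := PySem.Dict.counter words2
  c1.keys.foldl
    (fun acc w => if c2.contains w then acc + c1.getD w 0 * c2.getD w 0 else acc) 0

-- ===== PORT B =====
-- pos = [j for j, c in enumerate(pattern) if c == '1']
def pvOnes (p : List Char) : List Int :=
  ((PySem.List.enumerate p 0).filter (fun jc => jc.2 == '1')).map (fun jc => jc.1)

-- all(seq1[j + p] == seq2[i + p] for p in pos)
def pvWinEq (s1 s2 : List Char) (j i : Int) (pos : List Int) : Bool :=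
  pos.all (fun p => PySem.List.pyGetD s1 (j + p) ' ' == PySem.List.pyGetD s2 (i + p) ' ')

def spaced_word_matches_alt (seq1 : String) (seq2 : String) (pattern : String) : Int :=
  let s1 := seq1.toList
  let s2 := seq2.toList
  let pos := pvOnes pattern.toList
  let m : Int := pattern.toList.length
  (PySem.List.pyRange 0 ((s2.length : Int) - m + 1) 1).foldl
    (fun acc i =>
      (PySem.List.pyRange 0 ((s1.length : Int) - m + 1) 1).foldl
        (fun acc2 j => if pvWinEq s1 s2 j i pos then acc2 + 1 else acc2) acc)
    0

-- ===== PRECONDITION & SPEC =====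
def Spec_spaced_word_matches (seq1 : String) (seq2 : String) (pattern : String) (out : Int) : Prop := out = spaced_word_matches_alt seq1 seq2 pattern
instance (seq1 : String) (seq2 : String) (pattern : String) (out : Int) : Decidable (Spec_spaced_word_matches seq1 seq2 pattern out) := by unfold Spec_spaced_word_matches; infer_instance

-- ===== CLAIM (what is proved, stated in full; the proofs are below) =====
def Claim_equal_spaced_word_matches : Prop := ∀ (seq1 : String) (seq2 : String) (pattern : String), Dom_spaced_word_matches seq1 seq2 pattern → Spec_spaced_word_matches seq1 seq2 pattern (spaced_word_matches seq1 seq2 pattern)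

-- ===== LEMMAS AND PROOFS =====

-- the spaced word A joins at window start i, written as a map over the '1' positions
def pvWordAt (s : List Char) (ones : List Int) (i : Int) : String :=
  String.ofList (ones.map (fun j => PySem.List.pyGetD s (i + j) ' '))

-- B's pattern positions are exactly the filter A's inner loop performs.
theorem pvOnes_eq (p : List Char) :
    pvOnes p = (PySem.List.pyRange 0 (p.length : Int) 1).filter
      (fun j => PySem.List.pyGetD p j ' ' == '1') := by
  unfold pvOnes
  rw [PySem.List.enumerate_eq_map_pyRange p ' ']
  rw [List.filter_map, List.map_map]
  simp [Function.comp_def]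

-- A's extraction equals pvWordAt mapped over the same range.
theorem extract_eq (sequence pattern : String) :
    pvExtractA sequence pattern =
      (PySem.List.pyRange 0 ((sequence.toList.length : Int) - (pattern.toList.length : Int) + 1) 1).map
        (fun i => pvWordAt sequence.toList (pvOnes pattern.toList) i) := by
  unfold pvExtractA
  rw [PySem.List.foldl_append_singleton_eq_map]
  rw [List.nil_append]
  apply List.map_congr_left
  intro i _
  unfold pvWordAt
  rw [PySem.List.foldl_append_if, List.nil_append, pvOnes_eq]

-- Σ over a Nodup list of (if w = x then f w else 0) collapses to a lookup.
theorem sum_map_ite_eq (D : List String) (hD : D.Nodup) (x : String) (f : String → Int) :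
    (D.map (fun w => if w = x then f w else 0)).sum = if x ∈ D then f x else 0 := by
  induction D with
  | nil => simp
  | cons d t ih =>
    rcases List.nodup_cons.mp hD with ⟨hd, ht⟩
    by_cases h : d = x
    · subst h
      simp [List.mem_cons, hd]
      rw [List.map_congr_left (fun w hw => if_neg (fun he : w = d => hd (he ▸ hw)))]
      simp
    · simp [List.mem_cons, h, Ne.symm h, ih ht]

-- grouping: Σ_{w ∈ D} f w * count L w = Σ_{x ∈ L, x ∈ D} f x   (D nodup)
theorem sum_count_eq (D : List String) (hD : D.Nodup) (f : String → Int) :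
    ∀ (L : List String),
      (D.map (fun w => f w * (L.count w : Int))).sum =
        (L.map (fun x => if x ∈ D then f x else 0)).sum := by
  intro L
  induction L with
  | nil => simp
  | cons x t ih =>
    have : (D.map (fun w => f w * (((x :: t).count w : Nat) : Int))).sum =
        (D.map (fun w => f w * ((t.count w : Nat) : Int) + (if w = x then f w else 0))).sum := by
      apply congrArg
      apply List.map_congr_left
      intro w _
      by_cases h : w = x
      · subst h; simp [List.count_cons_self]; ring
      · have h1 : ¬ x = w := fun he => h he.symm
        simp [h, h1]
    rw [this, List.sum_map_add, ih, sum_map_ite_eq D hD x f]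
    simp [add_comm]

-- push an 'if' inside the running sum
theorem foldl_add_if (l : List String) (p : String → Bool) (g : String → Int) (a : Int) :
    l.foldl (fun acc w => if p w then acc + g w else acc) a =
      a + (l.map (fun w => if p w then g w else 0)).sum := by
  induction l generalizing a with
  | nil => simp
  | cons x t ih =>
    by_cases h : p x <;> simp [h, ih, add_assoc]

-- A's core counting loop, on arbitrary word lists: Σ over seq2 words of their count in seq1
theorem core_eq (w1 w2 : List String) :
    (PySem.Dict.counter w1).keys.foldl
      (fun acc w => if (PySem.Dict.counter w2).contains w
        then acc + (PySem.Dict.counter w1).getD w 0 * (PySem.Dict.counter w2).getD w 0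
        else acc) 0 =
    (w2.map (fun x => ((w1.count x : Nat) : Int))).sum := by
  rw [foldl_add_if]
  rw [zero_add]
  have hkeys := PySem.Dict.keys_counter (xs := w1)
  have hnd : (PySem.Dict.counter w1).keys.Nodup := PySem.Dict.nodup_keys_counter w1
  have hpt : ((PySem.Dict.counter w1).keys.map
      (fun w => if (PySem.Dict.counter w2).contains w
        then (PySem.Dict.counter w1).getD w 0 * (PySem.Dict.counter w2).getD w 0 else 0)) =
      ((PySem.Dict.counter w1).keys.map
        (fun w => ((w1.count w : Nat) : Int) * ((w2.count w : Nat) : Int))) := by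
    apply List.map_congr_left
    intro w _
    rw [PySem.Dict.getD_counter, PySem.Dict.getD_counter, PySem.Dict.contains_counter]
    by_cases h : w ∈ w2
    · simp [h]
    · simp [h, List.count_eq_zero_of_not_mem h]
  rw [hpt]
  have := sum_count_eq (PySem.Dict.counter w1).keys hnd
      (fun w => ((w1.count w : Nat) : Int)) w2
  rw [this]
  apply congrArg
  apply List.map_congr_left
  intro x _
  by_cases hx : x ∈ w1
  · rw [if_pos (by rw [hkeys]; exact (PySem.Set.mem_ofList w1 x).mpr hx)]
  · rw [if_neg (by rw [hkeys]; exact fun hmem => hx ((PySem.Set.mem_ofList w1 x).mp hmem))]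
    rw [List.count_eq_zero_of_not_mem hx]
    simp

-- B's character-wise window test is exactly equality of the two spaced words.
theorem winEq_iff (s1 s2 : List Char) (j i : Int) (ones : List Int) :
    pvWinEq s1 s2 j i ones = true ↔ pvWordAt s1 ones j = pvWordAt s2 ones i := by
  unfold pvWinEq pvWordAt
  rw [String.ofList_inj, List.map_eq_map_iff, List.all_eq_true]
  constructor
  · intro h p hp; exact beq_iff_eq.mp (h p hp)
  · intro h p hp; exact beq_iff_eq.mpr (h p hp)

-- count of a spaced word in seq1's word list = countP of B's window test
theorem count_eq_countP_winEq (s1 s2 : List Char) (ones : List Int) (r1 : List Int) (i : Int) :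
    ((r1.map (fun j => pvWordAt s1 ones j)).count (pvWordAt s2 ones i) : Int) =
      (r1.countP (fun j => pvWinEq s1 s2 j i ones) : Int) := by
  rw [List.count_eq_countP, List.countP_map]
  congr 1
  apply List.countP_congr
  intro j _
  simp only [Function.comp_apply]
  constructor
  · intro h; exact (winEq_iff s1 s2 j i ones).mpr (beq_iff_eq.mp h)
  · intro h; exact beq_iff_eq.mpr ((winEq_iff s1 s2 j i ones).mp h)

-- ===== VERDICT (by name: the statement is the Claim_ definition above) =====
theorem spaced_word_matches_spec : Claim_equal_spaced_word_matches := by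
  intro seq1 seq2 pattern _
  show spaced_word_matches seq1 seq2 pattern = spaced_word_matches_alt seq1 seq2 pattern
  simp only [spaced_word_matches, spaced_word_matches_alt]
  rw [core_eq (pvExtractA seq1 pattern) (pvExtractA seq2 pattern)]
  rw [extract_eq seq2 pattern, List.map_map]
  have hB : ∀ (r2 r1 : List Int) (a : Int),
      r2.foldl (fun acc i => r1.foldl
        (fun acc2 j => if pvWinEq seq1.toList seq2.toList j i (pvOnes pattern.toList)
          then acc2 + 1 else acc2) acc) a =
      a + (r2.map (fun i =>
        ((r1.countP (fun j => pvWinEq seq1.toList seq2.toList j i (pvOnes pattern.toList)) : Nat) : Int))).sum := by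
    intro r2 r1 a
    have hfun : (fun (acc : Int) i => r1.foldl
        (fun acc2 j => if pvWinEq seq1.toList seq2.toList j i (pvOnes pattern.toList)
          then acc2 + 1 else acc2) acc) =
        (fun (acc : Int) i => acc +
          ((r1.countP (fun j => pvWinEq seq1.toList seq2.toList j i (pvOnes pattern.toList)) : Nat) : Int)) := by
      funext acc i
      exact PySem.List.foldl_count_if _ r1 acc
    rw [hfun, PySem.List.foldl_add]
  rw [hB, zero_add]
  apply congrArg
  apply List.map_congr_left
  intro i _
  simp only [Function.comp_apply]
  rw [extract_eq seq1 pattern]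
  exact count_eq_countP_winEq seq1.toList seq2.toList (pvOnes pattern.toList) _ i
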